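-- pv_equiv track=rewrite | github.com/Samk13/invenio-formatter | lib/bibformat_utils.py | get_contextual_content
-- ===== SOURCE A (Python) =====
-- def get_contextual_content(text, keywords, max_lines=2):
--     """
--     Returns some lines from a text contextually to the keywords in
--     'keywords_string'
--
--     @param text the text from which we want to get contextual content
--     @param keywords a list of keyword strings ("the context")
--     @param max_lines the maximum number of line to return from the record
--     @return a string
--     """
--
--     def grade_line(text_line, keywords):
--         """
--         Grades a line according to keywords.
--
--         grade = number of keywords in the line
--         """
--         grade = 0
--         for keyword in keywords:
--             grade += text_line.upper().count(keyword.upper())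
--
--         return grade
--
--     #Grade each line according to the keywords
--     lines = text.split('.')
--     #print 'lines: ',lines
--     weights = [grade_line(x, keywords) for x in lines]
--
--     #print 'line weights: ', weights
--     def grade_region(lines_weight):
--         """
--         Grades a region. A region is a set of consecutive lines.
--
--         grade = sum of weights of the line composing the region
--         """
--         grade = 0
--         for weight in lines_weight:
--             grade += weight
--         return grade
--
--     if max_lines > 1:
--         region_weights = []
--         for index_weight in range(len(weights)- max_lines + 1):
--             region_weights.append(grade_region(weights[index_weight:(index_weight+max_lines)]))
--
--         weights = region_weights
--     #print 'region weights: ',weights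
--     #Returns line with maximal weight, and (max_lines - 1) following lines.
--     index_with_highest_weight = 0
--     highest_weight = 0
--     i = 0
--     for weight in weights:
--         if weight > highest_weight:
--             index_with_highest_weight = i
--             highest_weight = weight
--         i += 1
--     #print 'highest weight', highest_weight
--
--     if index_with_highest_weight+max_lines > len(lines):
--         return lines[index_with_highest_weight:]
--     else:
--         return lines[index_with_highest_weight:index_with_highest_weight+max_lines]
-- ===== SOURCE B (Python) =====
-- def get_contextual_content(text, keywords, max_lines=2):
--     lines = text.split('.')
--     ups = [line.upper() for line in lines]
--     kws = [kw.upper() for kw in keywords]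
--     weights = [sum(u.count(kw) for kw in kws) for u in ups]
--     if max_lines > 1:
--         pre = [0]
--         acc = 0
--         for w in weights:
--             acc += w
--             pre.append(acc)
--         weights = [pre[i + max_lines] - pre[i]
--                    for i in range(len(weights) - max_lines + 1)]
--     best_i = 0
--     best_w = 0
--     for i, w in enumerate(weights):
--         if w > best_w:
--             best_i, best_w = i, w
--     if best_i + max_lines > len(lines):
--         return lines[best_i:]
--     return lines[best_i:best_i + max_lines]
-- ===== Notes on version B (the rewrite author's own statement) =====
-- stated objective: alternative
-- what changed: B hoists the repeated line.upper()/keyword.upper() calls out of A's per-line keyword loop and replaces A's per-window slice-and-resum region grading with one prefix-sum pass, so each region weight is a constant-time subtraction instead of an O(max_lines) slice sum.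
import Mathlib
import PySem

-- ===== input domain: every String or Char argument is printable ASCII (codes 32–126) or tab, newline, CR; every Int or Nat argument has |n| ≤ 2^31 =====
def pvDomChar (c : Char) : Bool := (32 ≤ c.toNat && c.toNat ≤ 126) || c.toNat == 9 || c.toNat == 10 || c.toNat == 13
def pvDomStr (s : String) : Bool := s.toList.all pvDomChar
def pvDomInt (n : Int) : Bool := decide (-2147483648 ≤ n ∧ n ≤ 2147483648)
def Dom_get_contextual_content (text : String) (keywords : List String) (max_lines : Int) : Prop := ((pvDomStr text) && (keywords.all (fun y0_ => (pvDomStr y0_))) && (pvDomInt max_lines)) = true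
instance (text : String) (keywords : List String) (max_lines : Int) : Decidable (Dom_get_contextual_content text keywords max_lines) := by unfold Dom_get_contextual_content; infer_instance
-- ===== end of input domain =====

-- B hoists the repeated .upper() calls out of the keyword loop and computes region weights by a
-- single prefix-sum pass (constant-time subtraction per window) instead of A's per-window slice re-summation.

-- ===== PORT A =====
-- grade_line: for keyword in keywords: grade += text_line.upper().count(keyword.upper())
def gccGradeLine (text_line : String) (keywords : List String) : Int :=
  keywords.foldl (fun grade kw => grade + (PySem.Str.count (PySem.Str.upper text_line) (PySem.Str.upper kw) : Int)) 0

-- grade_region: for weight in lines_weight: grade += weight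
def gccGradeRegion (lines_weight : List Int) : Int :=
  lines_weight.foldl (fun grade w => grade + w) 0

def get_contextual_content (text : String) (keywords : List String) (max_lines : Int) : List String :=
  let lines := (PySem.Str.split? text ".").getD []  -- sep "." ≠ "", so split? is always some here
  let weights := lines.map (fun x => gccGradeLine x keywords)
  let weights :=
    if max_lines > 1 then
      (PySem.List.pyRange 0 (PySem.List.len weights - max_lines + 1) 1).foldl
        (fun region_weights iw =>
          region_weights ++ [gccGradeRegion (PySem.List.slice weights (some iw) (some (iw + max_lines)))]) []
    else weights
  let st := weights.foldl
    (fun (st : Int × Int × Int) weight =>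
      if weight > st.2.1 then (st.2.2, weight, st.2.2 + 1) else (st.1, st.2.1, st.2.2 + 1))
    (0, 0, 0)
  if st.1 + max_lines > PySem.List.len lines then
    PySem.List.slice lines (some st.1) none
  else
    PySem.List.slice lines (some st.1) (some (st.1 + max_lines))

-- ===== PORT B =====
def get_contextual_content_alt (text : String) (keywords : List String) (max_lines : Int) : List String :=
  let lines := (PySem.Str.split? text ".").getD []  -- sep "." ≠ "", so split? is always some here
  let ups := lines.map PySem.Str.upper
  let kws := keywords.map PySem.Str.upper
  let weights := ups.map (fun u => (kws.map (fun kw => (PySem.Str.count u kw : Int))).sum)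
  let weights :=
    if max_lines > 1 then
      let pre := (weights.foldl (fun (st : List Int × Int) w => (st.1 ++ [st.2 + w], st.2 + w)) ([0], 0)).1
      (PySem.List.pyRange 0 (PySem.List.len weights - max_lines + 1) 1).map
        (fun i => PySem.List.pyGetD pre (i + max_lines) 0 - PySem.List.pyGetD pre i 0)
    else weights
  let st := (PySem.List.enumerate weights 0).foldl
    (fun (st : Int × Int) p => if p.2 > st.2 then (p.1, p.2) else st) (0, 0)
  if st.1 + max_lines > PySem.List.len lines then
    PySem.List.slice lines (some st.1) none
  else
    PySem.List.slice lines (some st.1) (some (st.1 + max_lines))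

-- ===== PRECONDITION & SPEC =====
def Spec_get_contextual_content (text : String) (keywords : List String) (max_lines : Int) (out : List String) : Prop := out = get_contextual_content_alt text keywords max_lines
instance (text : String) (keywords : List String) (max_lines : Int) (out : List String) : Decidable (Spec_get_contextual_content text keywords max_lines out) := by unfold Spec_get_contextual_content; infer_instance

-- ===== CLAIM (what is proved, stated in full; the proofs are below) =====
def Claim_equal_get_contextual_content : Prop := ∀ (text : String) (keywords : List String) (max_lines : Int), Dom_get_contextual_content text keywords max_lines → Spec_get_contextual_content text keywords max_lines (get_contextual_content text keywords max_lines)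

-- ===== LEMMAS AND PROOFS =====

theorem gcc_line_weights_eq (keywords : List String) (lines : List String) :
    lines.map (fun x => gccGradeLine x keywords)
      = (lines.map PySem.Str.upper).map
          (fun u => ((keywords.map PySem.Str.upper).map (fun kw => (PySem.Str.count u kw : Int))).sum) := by
  simp [gccGradeLine, PySem.List.foldl_add, List.map_map, Function.comp_def]

theorem gcc_pre_spec (ws : List Int) :
    ∀ (acc : List Int) (s : Int),
    (ws.foldl (fun (st : List Int × Int) w => (st.1 ++ [st.2 + w], st.2 + w)) (acc, s))
      = (acc ++ (List.range ws.length).map (fun k => s + ((ws.take (k+1)).sum)), s + ws.sum) := by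
  induction ws with
  | nil => simp
  | cons w ws ih =>
    intro acc s
    simp only [List.foldl_cons, ih]
    simp [List.range_succ_eq_map, List.map_map, Function.comp_def, List.take_succ_cons, add_assoc]

theorem gcc_pre_get (ws : List Int) (j : Int) (h0 : 0 ≤ j) (h1 : j ≤ (ws.length : Int)) :
    PySem.List.pyGetD ((ws.foldl (fun (st : List Int × Int) w => (st.1 ++ [st.2 + w], st.2 + w)) ([0], 0)).1) j 0
      = (ws.take j.toNat).sum := by
  rw [gcc_pre_spec]
  simp only []
  rw [PySem.List.pyGetD_eq_getElem _ _ h0 (by simp; omega)]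
  rcases Nat.eq_zero_or_pos j.toNat with h | h
  · simp [h]
  · rw [List.getElem_append_right (by simp; omega)]
    simp only [List.length_cons, List.length_nil, List.getElem_map, List.getElem_range]
    have : j.toNat - 1 + 1 = j.toNat := by omega
    simp [this]

theorem gcc_region_eq (ws : List Int) (m : Int) (hm : m > 1) :
    (PySem.List.pyRange 0 (PySem.List.len ws - m + 1) 1).foldl
        (fun region_weights iw =>
          region_weights ++ [gccGradeRegion (PySem.List.slice ws (some iw) (some (iw + m)))]) []
      = (PySem.List.pyRange 0 (PySem.List.len ws - m + 1) 1).map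
          (fun i => PySem.List.pyGetD ((ws.foldl (fun (st : List Int × Int) w => (st.1 ++ [st.2 + w], st.2 + w)) ([0], 0)).1) (i + m) 0
            - PySem.List.pyGetD ((ws.foldl (fun (st : List Int × Int) w => (st.1 ++ [st.2 + w], st.2 + w)) ([0], 0)).1) i 0) := by
  rw [PySem.List.foldl_append_singleton_eq_map, List.nil_append]
  apply List.map_congr_left
  intro i hi
  rw [PySem.List.mem_pyRange_one] at hi
  obtain ⟨h0, h1⟩ := hi
  have hlen : i + m ≤ (ws.length : Int) := by simp [PySem.List.len] at h1 ⊢; omega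
  rw [gcc_pre_get ws i h0 (by omega), gcc_pre_get ws (i+m) (by omega) hlen]
  have hgr : ∀ l : List Int, gccGradeRegion l = l.sum := fun l => by
    rw [gccGradeRegion, List.sum_eq_foldl]
  rw [hgr, PySem.List.slice_toNat ws h0 (by omega)]
  have htn : (i + m).toNat = i.toNat + m.toNat := by omega
  have h2 : (i+m).toNat - i.toNat = m.toNat := by omega
  rw [h2, htn, List.take_add, List.sum_append]
  ring

theorem gcc_argmax_eq (ws : List Int) :
    ∀ (bi bw i : Int),
      ws.foldl (fun (st : Int × Int × Int) weight =>
          if weight > st.2.1 then (st.2.2, weight, st.2.2 + 1) else (st.1, st.2.1, st.2.2 + 1)) (bi, bw, i)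
        = (((PySem.List.enumerate ws i).foldl
            (fun (st : Int × Int) p => if p.2 > st.2 then (p.1, p.2) else st) (bi, bw)).1,
           ((PySem.List.enumerate ws i).foldl
            (fun (st : Int × Int) p => if p.2 > st.2 then (p.1, p.2) else st) (bi, bw)).2,
           i + ws.length) := by
  induction ws with
  | nil => simp [PySem.List.enumerate]
  | cons w ws ih =>
    intro bi bw i
    simp only [List.foldl_cons, PySem.List.enumerate_cons]
    by_cases h : w > bw <;> simp [h, ih] <;> ring_nf

-- ===== VERDICT (by name: the statement is the Claim_ definition above) =====
theorem get_contextual_content_spec : Claim_equal_get_contextual_content := by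
  intro text keywords max_lines _
  unfold Spec_get_contextual_content get_contextual_content get_contextual_content_alt
  simp only [gcc_line_weights_eq, gcc_argmax_eq]
  by_cases hm : max_lines > 1
  · simp only [if_pos hm, gcc_region_eq _ _ hm]
  · simp only [if_neg hm]
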